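-- pv_equiv track=rewrite | github.com/ssrividhyadeepak/rag-example | src/rag_engine/generator.py | _get_time_range
-- ===== SOURCE A (Python) =====
-- from typing import List, Dict, Any, Optional
--
-- def _get_time_range(logs: List[Dict[str, Any]]) -> Optional[str]:
--     """Get time range covered by logs."""
--     if not logs:
--         return None
--
--     timestamps = []
--     for log in logs:
--         if "timestamp" in log:
--             timestamps.append(log["timestamp"])
--
--     if not timestamps:
--         return None
--
--     min_time = min(timestamps)
--     max_time = max(timestamps)
--
--     if min_time == max_time:
--         return f"Single timestamp: {min_time}"
--     else:
--         return f"From {min_time} to {max_time}"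
-- ===== SOURCE B (Python) =====
-- from typing import List, Dict, Any, Optional
--
-- def _get_time_range(logs: List[Dict[str, Any]]) -> Optional[str]:
--     """Get time range covered by logs."""
--     bounds = None
--     for log in logs:
--         if "timestamp" in log:
--             t = log["timestamp"]
--             if bounds is None:
--                 bounds = (t, t)
--             else:
--                 lo, hi = bounds
--                 bounds = (t if t < lo else lo, t if t > hi else hi)
--
--     if bounds is None:
--         return None
--
--     lo, hi = bounds
--     if lo == hi:
--         return f"Single timestamp: {lo}"
--     return f"From {lo} to {hi}"
-- ===== Notes on version B (the rewrite author's own statement) =====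
-- stated objective: alternative
-- what changed: B makes a single streaming pass over the logs maintaining a running (lo, hi) bounds pair, instead of A's collect-into-a-list then separate min() and max() scans.
import Mathlib
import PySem

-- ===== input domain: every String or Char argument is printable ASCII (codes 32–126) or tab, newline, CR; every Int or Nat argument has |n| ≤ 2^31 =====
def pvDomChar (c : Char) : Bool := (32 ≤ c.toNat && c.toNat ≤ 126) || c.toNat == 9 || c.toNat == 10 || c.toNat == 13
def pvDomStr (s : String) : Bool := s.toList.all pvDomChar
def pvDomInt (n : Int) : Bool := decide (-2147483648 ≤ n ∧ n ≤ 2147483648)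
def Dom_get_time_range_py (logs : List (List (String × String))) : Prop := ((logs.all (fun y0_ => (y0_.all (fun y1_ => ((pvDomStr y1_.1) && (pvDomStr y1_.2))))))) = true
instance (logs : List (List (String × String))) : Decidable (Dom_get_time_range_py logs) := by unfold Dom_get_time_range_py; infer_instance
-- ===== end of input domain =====

-- B replaces A's collect-into-a-list plus separate min()/max() scans by ONE streaming pass
-- maintaining a running (lo, hi) bounds pair (alternative decomposition, same result; no speed claim).
-- ===== PORT A =====
-- Transliteration of A: foldl-append collection of timestamps, then min/max (first extremal element).
def get_time_range_py (logs : List (List (String × String))) : Option String :=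
  if logs = [] then none
  else
    let timestamps := logs.foldl (fun acc log =>
      if (PySem.Dict.mk log).contains "timestamp" then
        acc ++ [((PySem.Dict.mk log).get? "timestamp").getD ""]
      else acc) []
    if timestamps = [] then none
    else
      match PySem.List.min? timestamps (fun x => x), PySem.List.max? timestamps (fun x => x) with
      | some min_time, some max_time =>
          if min_time = max_time then some ("Single timestamp: " ++ min_time)
          else some ("From " ++ min_time ++ " to " ++ max_time)
      | _, _ => none

-- ===== PORT B =====
-- Loop body of B: update the optional running bounds pair with one timestamp.
def pvUpdateBounds (bounds : Option (String × String)) (t : String) : Option (String × String) :=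
  match bounds with
  | none => some (t, t)
  | some (lo, hi) => some ((if t < lo then t else lo), (if t > hi then t else hi))

-- B: one pass over the logs, maintaining (lo, hi); no intermediate timestamp list.
def get_time_range_py_alt (logs : List (List (String × String))) : Option String :=
  let bounds := logs.foldl (fun bounds log =>
    if (PySem.Dict.mk log).contains "timestamp" then
      pvUpdateBounds bounds (((PySem.Dict.mk log).get? "timestamp").getD "")
    else bounds) none
  match bounds with
  | none => none
  | some (lo, hi) =>
      if lo = hi then some ("Single timestamp: " ++ lo)
      else some ("From " ++ lo ++ " to " ++ hi)

-- ===== PRECONDITION & SPEC =====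
def Spec_get_time_range_py (logs : List (List (String × String))) (out : Option String) : Prop := out = get_time_range_py_alt logs
instance (logs : List (List (String × String))) (out : Option String) : Decidable (Spec_get_time_range_py logs out) := by unfold Spec_get_time_range_py; infer_instance

-- ===== CLAIM =====
def Claim_equal_get_time_range_py : Prop := ∀ (logs : List (List (String × String))), Dom_get_time_range_py logs → Spec_get_time_range_py logs (get_time_range_py logs)

-- ===== LEMMAS AND PROOFS =====

-- B's fold over logs equals the same bounds fold over the list of collected timestamps.
theorem pv_fold_logs_eq (logs : List (List (String × String)))
    (st : Option (String × String)) :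
    logs.foldl (fun bounds log =>
      if (PySem.Dict.mk log).contains "timestamp" then
        pvUpdateBounds bounds (((PySem.Dict.mk log).get? "timestamp").getD "")
      else bounds) st
    = (logs.foldl (fun acc log =>
        if (PySem.Dict.mk log).contains "timestamp" then
          acc ++ [((PySem.Dict.mk log).get? "timestamp").getD ""]
        else acc) []).foldl pvUpdateBounds st := by
  rw [PySem.List.foldl_append_if]
  induction logs generalizing st with
  | nil => rfl
  | cons l t ih =>
    simp only [List.foldl_cons, List.filter_cons]
    by_cases h : (PySem.Dict.mk l).contains "timestamp"
    · simp only [if_pos h, List.map_cons]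
      rw [ih]
      simp only [List.nil_append, List.foldl_cons]
    · simp only [if_neg h]
      rw [ih, List.nil_append]

-- B's branch-wise updates are min/max.
theorem pv_lo_is_min (a t : String) : (if t < a then t else a) = min a t := by
  rw [min_def]
  split_ifs with h1 h2 h2
  · exact absurd h2 (not_le.mpr h1)
  · rfl
  · rfl
  · exact absurd (not_le.mp h2) h1

theorem pv_hi_is_max (a t : String) : (if t > a then t else a) = max a t := by
  rw [max_def]
  split_ifs with h1 h2 h2
  · rfl
  · exact absurd (le_of_lt h1) h2
  · exact le_antisymm h2 (not_lt.mp h1)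
  · rfl

-- The bounds fold over a nonempty timestamp list is (running min, running max).
theorem pv_bounds_fold (ts : List String) (lo hi : String) :
    ts.foldl pvUpdateBounds (some (lo, hi)) = some (ts.foldl min lo, ts.foldl max hi) := by
  induction ts generalizing lo hi with
  | nil => rfl
  | cons t rest ih =>
    simp only [List.foldl_cons, pvUpdateBounds, pv_lo_is_min, pv_hi_is_max, ih]

-- ===== VERDICT =====
theorem get_time_range_py_spec : Claim_equal_get_time_range_py := by
  intro logs _
  unfold Spec_get_time_range_py get_time_range_py get_time_range_py_alt
  rw [pv_fold_logs_eq]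
  set ts := logs.foldl (fun acc log =>
      if (PySem.Dict.mk log).contains "timestamp" then
        acc ++ [((PySem.Dict.mk log).get? "timestamp").getD ""]
      else acc) [] with hts
  by_cases hlogs : logs = []
  · subst hlogs; simp [hts]
  · simp only [if_neg hlogs]
    cases h : ts with
    | nil => simp
    | cons t rest =>
      simp only [List.foldl_cons, pvUpdateBounds, pv_bounds_fold,
        PySem.List.min?_id_cons, PySem.List.max?_id_cons]
      simp
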